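-- pv_equiv track=rewrite | github.com/datawhalechina/huawei-od-python | codes/others100/023_find-max-distance.py | solve_method
-- ===== SOURCE A (Python) =====
-- def solve_method(sites):
--     # 初始化最大距离为0
--     max_distance = 0
--
--     for i, n in enumerate(sites):
--         if n == 0:
--             # 计算该空车位与最近的已停车车辆之间的距离
--             distance = min([abs(i - j) for j, x in enumerate(sites) if x == 1])
--             # 获取最大距离
--             if distance > max_distance:
--                 max_distance = distance
--
--     return max_distance
-- ===== SOURCE B (Python) =====
-- def solve_method(sites):
--     # Two-pass sweep: distance to nearest 1 from the left and from the right,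
--     # then take the max of the per-empty-spot minima.  O(n) instead of O(n^2).
--     if 0 not in sites or 1 not in sites:
--         # no empty spot, or no parked car at all: nothing to measure
--         return 0
--     inf = len(sites) + 1
--
--     def sweep(xs):
--         out = []
--         d = inf
--         for x in xs:
--             d = 0 if x == 1 else d + 1
--             out.append(d)
--         return out
--
--     left = sweep(sites)
--     right = sweep(sites[::-1])[::-1]
--     best = 0
--     for x, l, r in zip(sites, left, right):
--         if x == 0:
--             dmin = min(l, r)
--             if dmin > best:
--                 best = dmin
--     return best
-- ===== Notes on version B (the rewrite author's own statement) =====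
-- stated objective: faster
-- what changed: Replaced the per-empty-spot scan over all occupied spots (min over a rebuilt comprehension inside the loop) by an early 0 when there is no empty spot, and otherwise two linear sweeps computing each index distance to the nearest 1 from the left and from the right, then one pass taking the max of the minima.
import Mathlib
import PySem

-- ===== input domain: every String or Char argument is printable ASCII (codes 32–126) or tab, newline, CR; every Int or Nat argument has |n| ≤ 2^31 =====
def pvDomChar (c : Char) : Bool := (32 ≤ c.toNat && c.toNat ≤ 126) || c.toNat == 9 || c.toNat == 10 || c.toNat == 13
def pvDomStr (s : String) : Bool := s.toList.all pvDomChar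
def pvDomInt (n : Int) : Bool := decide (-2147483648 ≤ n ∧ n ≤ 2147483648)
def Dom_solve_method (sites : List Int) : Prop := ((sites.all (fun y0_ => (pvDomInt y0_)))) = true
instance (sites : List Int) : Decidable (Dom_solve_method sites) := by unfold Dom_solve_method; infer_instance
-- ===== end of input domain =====

-- B replaces A's per-empty-spot rescan of all occupied spots by two linear
-- nearest-1 sweeps (left then right) plus an early 0 when no spot is empty; objective: faster.

-- ===== PORT A =====
def solve_method (sites : List Int) : Int :=
  (PySem.List.enumerate sites 0).foldl
    (fun max_distance p =>
      if p.2 = 0 then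
        -- min([...]) raises ValueError on an empty list; Pre_ excludes that, .getD 0 is never used inside Pre_
        let distance := (PySem.List.min?
          (((PySem.List.enumerate sites 0).filter (fun q => q.2 == 1)).map
            (fun q => |p.1 - q.1|)) (fun y => y)).getD 0
        if distance > max_distance then distance else max_distance
      else max_distance) 0

-- ===== PORT B =====
-- helper: running distance-to-last-1 sweep (Source B's `sweep`)
def pvSweep : List Int → Int → List Int
  | [], _ => []
  | x :: xs, d =>
    let d' := if x = 1 then 0 else d + 1
    d' :: pvSweep xs d'

def solve_method_alt (sites : List Int) : Int :=
  if ¬ sites.contains 0 ∨ ¬ sites.contains 1 then 0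
  else
    let inf : Int := (sites.length : Int) + 1
    let left := pvSweep sites inf
    let right := (pvSweep sites.reverse inf).reverse
    (sites.zip (left.zip right)).foldl
      (fun best p =>
        if p.1 = 0 then
          let dmin := min p.2.1 p.2.2
          if dmin > best then dmin else best
        else best) 0

-- ===== PRECONDITION & SPEC =====
-- Pre_ excludes exactly the inputs on which A raises ValueError (an empty
-- spot exists but no occupied spot, so min() is applied to an empty list).
def Pre_solve_method (sites : List Int) : Prop := (0 : Int) ∈ sites → (1 : Int) ∈ sites
instance (sites : List Int) : Decidable (Pre_solve_method sites) := by
  unfold Pre_solve_method; infer_instance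
def pvWitness_solve_method : List Int := [1, 0, 0, 1, 0]

def Spec_solve_method (sites : List Int) (out : Int) : Prop := out = solve_method_alt sites
instance (sites : List Int) (out : Int) : Decidable (Spec_solve_method sites out) := by
  unfold Spec_solve_method; infer_instance

-- ===== CLAIM (what is proved, stated in full; the proofs are below) =====
def Claim_equal_solve_method : Prop := ∀ (sites : List Int), Dom_solve_method sites →
  Pre_solve_method sites → Spec_solve_method sites (solve_method sites)

-- ===== LEMMAS AND PROOFS =====

theorem pvSweep_length (xs : List Int) (d : Int) : (pvSweep xs d).length = xs.length := by
  induction xs generalizing d with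
  | nil => rfl
  | cons x xs ih => simp [pvSweep, ih]

-- every sweep value is at most d + k + 1 (for a nonnegative start value)
theorem pvSweep_upper (xs : List Int) (d : Int) (hd : 0 ≤ d) (k : Nat) (hk : k < xs.length) :
    (pvSweep xs d)[k]'(by simpa [pvSweep_length] using hk) ≤ d + k + 1 := by
  induction xs generalizing d k with
  | nil => simp at hk
  | cons x xs ih =>
    cases k with
    | zero =>
      by_cases hx : x = 1
      · simp [pvSweep, hx]; omega
      · simp [pvSweep, hx]
    | succ k =>
      have hk' : k < xs.length := by simpa using hk
      by_cases hx : x = 1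
      · have := ih 0 le_rfl k hk'
        simp only [pvSweep, hx, if_pos, List.getElem_cons_succ]
        push_cast; push_cast at this; omega
      · have := ih (d + 1) (by omega) k hk'
        simp only [pvSweep, hx, ite_false, List.getElem_cons_succ]
        push_cast; push_cast at this; omega

-- sweep value at k is at most k - j for every occupied j ≤ k
theorem pvSweep_le (xs : List Int) (d : Int) (k j : Nat) (hk : k < xs.length)
    (hj : j ≤ k) (h1 : xs[j]'(by omega) = 1) :
    (pvSweep xs d)[k]'(by simpa [pvSweep_length] using hk) ≤ (k : Int) - j := by
  induction xs generalizing d k j with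
  | nil => simp at hk
  | cons x xs ih =>
    cases k with
    | zero =>
      interval_cases j
      simp_all [pvSweep]
    | succ k =>
      have hk' : k < xs.length := by simpa using hk
      cases j with
      | zero =>
        have hx : x = 1 := by simpa using h1
        have := pvSweep_upper xs 0 le_rfl k hk'
        simp only [pvSweep, hx, if_pos, List.getElem_cons_succ]
        push_cast; push_cast at this; omega
      | succ j =>
        have := ih (if x = 1 then 0 else d + 1) k j hk' (by omega) (by simpa using h1)
        simp only [pvSweep, List.getElem_cons_succ]
        push_cast; push_cast at this; omega

-- sweep value at k is attained at some occupied j ≤ k, or is the sentinel d + k + 1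
theorem pvSweep_attain (xs : List Int) (d : Int) (k : Nat) (hk : k < xs.length) :
    (∃ j : Nat, ∃ hj : j < xs.length, j ≤ k ∧ xs[j]'hj = 1 ∧
      (pvSweep xs d)[k]'(by simpa [pvSweep_length] using hk) = (k : Int) - j) ∨
    (pvSweep xs d)[k]'(by simpa [pvSweep_length] using hk) = d + k + 1 := by
  induction xs generalizing d k with
  | nil => simp at hk
  | cons x xs ih =>
    cases k with
    | zero =>
      by_cases hx : x = 1
      · exact Or.inl ⟨0, by simp, by simp, by simpa using hx, by simp [pvSweep, hx]⟩
      · exact Or.inr (by simp [pvSweep, hx])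
    | succ k =>
      have hk' : k < xs.length := by simpa using hk
      rcases ih (if x = 1 then 0 else d + 1) k hk' with ⟨j, hj, hjk, h1, hval⟩ | hval
      · refine Or.inl ⟨j + 1, by simpa using hj, by omega, by simpa using h1, ?_⟩
        simp only [pvSweep, List.getElem_cons_succ]
        rw [hval]; push_cast; ring
      · by_cases hx : x = 1
        · refine Or.inl ⟨0, by simp, by omega, by simpa using hx, ?_⟩
          simp only [pvSweep, List.getElem_cons_succ]
          rw [hval, if_pos hx]; push_cast; ring
        · refine Or.inr ?_
          simp only [pvSweep, List.getElem_cons_succ]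
          rw [hval, if_neg hx]; push_cast; ring

-- B's per-index value: min of left/right sweep equals A's min over all occupied spots
-- candidate distances A's comprehension builds at index k
theorem pv_mem_cands (sites : List Int) (k : Nat) (c : Int) :
    c ∈ ((PySem.List.enumerate sites 0).filter (fun q => q.2 == 1)).map
        (fun q => |(k : Int) - q.1|) ↔
    ∃ j : Nat, ∃ hj : j < sites.length, sites[j]'hj = 1 ∧ c = |(k : Int) - j| := by
  simp only [List.mem_map, List.mem_filter, PySem.List.mem_enumerate_iff]
  constructor
  · rintro ⟨q, ⟨⟨j, hj, rfl⟩, h1⟩, rfl⟩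
    exact ⟨j, hj, by simpa using h1, by simp⟩
  · rintro ⟨j, hj, h1, rfl⟩
    exact ⟨((j : Int), sites[j]), ⟨⟨j, hj, by simp⟩, by simpa using h1⟩, by simp⟩

theorem pv_pointwise (sites : List Int) (k : Nat) (hk : k < sites.length)
    (h1 : (1 : Int) ∈ sites) :
    min ((pvSweep sites ((sites.length : Int) + 1))[k]'(by simpa [pvSweep_length] using hk))
      (((pvSweep sites.reverse ((sites.length : Int) + 1)).reverse)[k]'(by
        simp [pvSweep_length]; omega)) =
    (PySem.List.min?
      (((PySem.List.enumerate sites 0).filter (fun q => q.2 == 1)).map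
        (fun q => |(k : Int) - q.1|)) (fun y => y)).getD 0 := by
  set n := sites.length with hn
  set inf : Int := (n : Int) + 1 with hinf
  set L := (pvSweep sites inf)[k]'(by simpa [pvSweep_length] using hk) with hL
  set R := ((pvSweep sites.reverse inf).reverse)[k]'(by simp [pvSweep_length]; omega) with hR
  set cands := ((PySem.List.enumerate sites 0).filter (fun q => q.2 == 1)).map
      (fun q => |(k : Int) - q.1|) with hcands
  -- the occupied witness index
  obtain ⟨j0, hj0, hj0v⟩ := List.mem_iff_getElem.mp h1
  have hwit : |(k : Int) - j0| ∈ cands := (pv_mem_cands sites k _).mpr ⟨j0, hj0, hj0v, rfl⟩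
  have hwitle : |(k : Int) - j0| ≤ (n : Int) - 1 := by
    rcases le_total ((j0 : Int)) (k : Int) with h | h
    · rw [abs_of_nonneg (by omega)]; omega
    · rw [abs_of_nonpos (by omega)]; omega
  -- R in terms of the reversed sweep
  have hRrev : R = (pvSweep sites.reverse inf)[n - 1 - k]'(by
      simp [pvSweep_length]; omega) := by
    rw [hR, List.getElem_reverse]; congr 1; simp [pvSweep_length]; omega
  -- lower bound: min L R ≤ every candidate
  have hlow : ∀ c ∈ cands, min L R ≤ c := by
    intro c hc
    obtain ⟨j, hj, hj1, rfl⟩ := (pv_mem_cands sites k c).mp hc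
    rcases le_total j k with h | h
    · rw [abs_of_nonneg (by omega)]
      exact le_trans (min_le_left L R)
        (by rw [hL]; exact pvSweep_le sites inf k j (by omega) h hj1)
    · have hrj : (sites.reverse)[n - 1 - j]'(by simp; omega) = 1 := by
        rw [List.getElem_reverse]; simp only [← hn]
        have : n - 1 - (n - 1 - j) = j := by omega
        simp_rw [this]; exact hj1
      have hle2 := pvSweep_le sites.reverse inf (n - 1 - k) (n - 1 - j) (by simp; omega)
        (by omega) hrj
      rw [abs_of_nonpos (by omega)]
      refine le_trans (min_le_right L R) ?_
      rw [hRrev]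
      omega
  -- min L R is itself a candidate
  have hbound : min L R ≤ (n : Int) - 1 := le_trans (hlow _ hwit) hwitle
  have hmem : min L R ∈ cands := by
    rcases min_choice L R with h | h
    · rcases pvSweep_attain sites inf k hk with ⟨j, hj, hjk, hj1, hval⟩ | hval
      · refine (pv_mem_cands sites k _).mpr ⟨j, hj, hj1, ?_⟩
        rw [h, hL, hval, abs_of_nonneg (by omega)]
      · exfalso; rw [h, hL, hval] at hbound; omega
    · rcases pvSweep_attain sites.reverse inf (n - 1 - k) (by simp; omega) with
        ⟨j', hj', hjk', hj1', hval⟩ | hval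
      · have hj'n : j' < n := by simpa using hj'
        have hs : sites[n - 1 - j']'(by omega) = 1 := by
          rw [List.getElem_reverse] at hj1'
          simpa [← hn] using hj1'
        refine (pv_mem_cands sites k _).mpr ⟨n - 1 - j', by omega, hs, ?_⟩
        rw [h, hRrev, hval, abs_of_nonpos (by omega)]
        omega
      · exfalso
        rw [h, hRrev, hval] at hbound
        omega
  -- min? returns some value, characterize it
  obtain ⟨v, hv⟩ : ∃ v, PySem.List.min? cands (fun y => y) = some v := by
    rcases h : PySem.List.min? cands (fun y => y) with _ | v
    · rw [PySem.List.min?_eq_none_iff] at h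
      rw [h] at hwit; simp at hwit
    · exact ⟨v, rfl⟩
  rw [hv]
  have hvm : v ∈ cands := PySem.List.min?_mem hv
  have h1' : v ≤ min L R := PySem.List.min?_isMin hv _ hmem
  have h2' : min L R ≤ v := hlow _ hvm
  simp only [Option.getD_some]
  omega

-- the two result loops agree step by step, given the per-index distance fact
theorem pv_fold (cand : Int → Int) (ps : List ((Int × Int) × (Int × Int))) (acc : Int)
    (h : ∀ p ∈ ps, p.1.2 = 0 → min p.2.1 p.2.2 = cand p.1.1) :
    (ps.map Prod.fst).foldl
      (fun max_distance p =>
        if p.2 = 0 then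
          let distance := cand p.1
          if distance > max_distance then distance else max_distance
        else max_distance) acc =
    (ps.map (fun p => (p.1.2, p.2))).foldl
      (fun best p =>
        if p.1 = 0 then
          let dmin := min p.2.1 p.2.2
          if dmin > best then dmin else best
        else best) acc := by
  induction ps generalizing acc with
  | nil => rfl
  | cons p ps ih =>
    simp only [List.map_cons, List.foldl_cons]
    by_cases hp : p.1.2 = 0
    · rw [if_pos hp, if_pos hp, h p (by simp) hp]
      exact ih _ (fun q hq => h q (by simp [hq]))
    · rw [if_neg hp, if_neg hp]
      exact ih _ (fun q hq => h q (by simp [hq]))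

-- dropping the indices from a zipped enumerate gives the plain zip
theorem pv_zip_enum {β : Type} (xs : List Int) (s : Int) (bs : List β) :
    ((PySem.List.enumerate xs s).zip bs).map (fun p => (p.1.2, p.2)) = xs.zip bs := by
  induction xs generalizing s bs with
  | nil => simp [PySem.List.enumerate_nil]
  | cons x xs ih =>
    cases bs with
    | nil => simp [PySem.List.enumerate_cons]
    | cons b bs => simp [PySem.List.enumerate_cons, ih]

theorem solve_method_spec : Claim_equal_solve_method := by
  intro sites _ hpre
  unfold Spec_solve_method solve_method solve_method_alt
  by_cases hc : sites.contains 1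
  case neg =>
    -- Pre_ rules this case out unless sites has no 0 either; either way both sides are 0
    rw [if_pos (Or.inr (by simpa using hc))]
    have h0 : (0 : Int) ∉ sites := fun h0 => hc (by simpa using hpre h0)
    rw [PySem.List.foldl_congr_mem (g := fun md _ => md), PySem.List.foldl_ignore]
    intro acc p hp
    obtain ⟨j, hj, rfl⟩ := (PySem.List.mem_enumerate_iff _ _ _).mp hp
    have : sites[j] ≠ 0 := fun h => h0 (h ▸ List.getElem_mem hj)
    simp [this]
  case pos =>
  by_cases hz : sites.contains 0
  case neg =>
    rw [if_pos (Or.inl (by simpa using hz))]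
    have h0 : (0 : Int) ∉ sites := by simpa using hz
    rw [PySem.List.foldl_congr_mem (g := fun md _ => md), PySem.List.foldl_ignore]
    intro acc p hp
    obtain ⟨j, hj, rfl⟩ := (PySem.List.mem_enumerate_iff _ _ _).mp hp
    have : sites[j] ≠ 0 := fun h => h0 (h ▸ List.getElem_mem hj)
    simp [this]
  case pos =>
    rw [if_neg (by simp; exact ⟨by simpa using hz, by simpa using hc⟩)]
    have h1 : (1 : Int) ∈ sites := by simpa using hc
    have hLlen : (pvSweep sites ((sites.length : Int) + 1)).length = sites.length :=
      pvSweep_length _ _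
    have hRlen : ((pvSweep sites.reverse ((sites.length : Int) + 1)).reverse).length =
        sites.length := by simp [pvSweep_length]
    have hElen : (PySem.List.enumerate sites 0).length = sites.length := by
      simp [PySem.List.length_enumerate]
    have key := pv_fold
      (fun i => (PySem.List.min?
        (((PySem.List.enumerate sites 0).filter (fun q => q.2 == 1)).map
          (fun q => |i - q.1|)) (fun y => y)).getD 0)
      ((PySem.List.enumerate sites 0).zip
        ((pvSweep sites ((sites.length : Int) + 1)).zip
          ((pvSweep sites.reverse ((sites.length : Int) + 1)).reverse))) 0 ?_
    · rw [List.map_fst_zip (by simp [hElen, hLlen, hRlen]), pv_zip_enum] at key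
      exact key
    · intro p hp hp0
      obtain ⟨i, hi, hpi⟩ := List.mem_iff_getElem.mp hp
      have hin : i < sites.length := by
        simp only [List.length_zip, hElen, hLlen, hRlen] at hi; omega
      have hpeq : p = (((i : Int), sites[i]'hin),
          (((pvSweep sites ((sites.length : Int) + 1))[i]'(by omega),
            ((pvSweep sites.reverse ((sites.length : Int) + 1)).reverse)[i]'(by omega)))) := by
        rw [← hpi, List.getElem_zip, List.getElem_zip]
        congr 1
        simp [PySem.List.getElem_enumerate]
      rw [hpeq]
      exact pv_pointwise sites i hin h1
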